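-- pv_equiv track=rewrite | github.com/rotemwiessman/Ex6_with_seggev | wave_editor.py | slow_down_filter
-- ===== SOURCE A (Python) =====
-- def average_pairs(list_of_lists):
--     """
--     gets list of two lists and calculate the average of every argument in
--     these lists.
--     returns list with the averages
--     :param list_of_lists: list of lists
--     :return: average (list)
--     """
--     if list_of_lists == []:
--         return []
--     average = [0, 0]
--     for pair in range(len(list_of_lists)):
--         average[0] += list_of_lists[pair][0]
--         average[1] += list_of_lists[pair][1]
--     average[0] = int(average[0]/len(list_of_lists))
--     average[1] = int(average[1]/len(list_of_lists))
--     return average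
--
-- def slow_down_filter(audio_data):
--     """
--     slows down the m
--     :param audio_data:
--     :return:
--     """
--     new_audio_data = []
--     for i in range(len(audio_data)*2 - 1):
--         if i % 2 == 0:
--             new_audio_data.append(audio_data[i//2])
--         else:
--             new_audio_data.append(average_pairs([audio_data[i//2],
--                                                  audio_data[i//2 + 1]]))
--     return new_audio_data
-- ===== SOURCE B (Python) =====
-- def slow_down_filter(audio_data):
--     """Upsample by inserting the truncated average between each adjacent pair.
--
--     Simpler decomposition: iterate over adjacent pairs directly instead of
--     over 2n-1 positions with parity/index arithmetic and a helper.
--     """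
--     if not audio_data:
--         return []
--     new_audio_data = []
--     for cur, nxt in zip(audio_data, audio_data[1:]):
--         new_audio_data.append(cur)
--         new_audio_data.append([int((cur[0] + nxt[0]) / 2),
--                                int((cur[1] + nxt[1]) / 2)])
--     new_audio_data.append(audio_data[-1])
--     return new_audio_data
-- ===== Notes on version B (the rewrite author's own statement) =====
-- stated objective: simpler
-- what changed: B iterates once over adjacent pairs (zip) appending each sample and its truncated midpoint, then appends the last sample, eliminating A's 2n-1 position loop with parity branch, i//2 index arithmetic and the average_pairs helper.
import Mathlib
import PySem

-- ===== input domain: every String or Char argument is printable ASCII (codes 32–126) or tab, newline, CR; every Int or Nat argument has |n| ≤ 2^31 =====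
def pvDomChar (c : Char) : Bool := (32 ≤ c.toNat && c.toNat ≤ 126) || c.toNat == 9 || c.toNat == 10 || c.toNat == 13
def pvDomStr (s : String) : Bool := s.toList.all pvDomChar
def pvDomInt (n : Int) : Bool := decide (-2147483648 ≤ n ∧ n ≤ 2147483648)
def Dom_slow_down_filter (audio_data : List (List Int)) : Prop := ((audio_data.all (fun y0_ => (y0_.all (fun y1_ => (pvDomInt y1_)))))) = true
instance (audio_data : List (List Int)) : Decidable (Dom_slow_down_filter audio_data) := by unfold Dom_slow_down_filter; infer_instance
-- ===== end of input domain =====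

-- B iterates once over adjacent pairs appending sample + truncated midpoint, replacing A's 2n-1 position loop with parity branch and the average_pairs helper (simpler decomposition, same cost).


-- ===== PORT A =====
-- int(x/len) is float truncation toward zero; exact as PySem.Int.truncdiv on the stated |n| ≤ 2^31 domain.
def average_pairs (list_of_lists : List (List Int)) : List Int :=
  if list_of_lists = [] then []
  else
    let n : Int := (list_of_lists.length : Int)
    let average :=
      (PySem.List.pyRange 0 n 1).foldl
        (fun (a : Int × Int) pair =>
          (a.1 + PySem.List.pyGetD (PySem.List.pyGetD list_of_lists pair []) 0 0,
           a.2 + PySem.List.pyGetD (PySem.List.pyGetD list_of_lists pair []) 1 0))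
        (0, 0)
    [PySem.Int.truncdiv average.1 n, PySem.Int.truncdiv average.2 n]

def slow_down_filter (audio_data : List (List Int)) : List (List Int) :=
  (PySem.List.pyRange 0 ((audio_data.length : Int) * 2 - 1) 1).foldl
    (fun acc i =>
      acc ++ [if PySem.Int.mod i 2 = 0 then
                PySem.List.pyGetD audio_data (PySem.Int.floordiv i 2) []
              else
                average_pairs [PySem.List.pyGetD audio_data (PySem.Int.floordiv i 2) [],
                               PySem.List.pyGetD audio_data (PySem.Int.floordiv i 2 + 1) []]])
    []

-- ===== PORT B =====
-- the interpolated midpoint [int((c[0]+n[0])/2), int((c[1]+n[1])/2)]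
def pvMid (c n : List Int) : List Int :=
  [PySem.Int.truncdiv (PySem.List.pyGetD c 0 0 + PySem.List.pyGetD n 0 0) 2,
   PySem.Int.truncdiv (PySem.List.pyGetD c 1 0 + PySem.List.pyGetD n 1 0) 2]

def slow_down_filter_alt (audio_data : List (List Int)) : List (List Int) :=
  if audio_data = [] then []
  else
    ((audio_data.zip (audio_data.drop 1)).foldl
      (fun acc cn => acc ++ [cn.1, pvMid cn.1 cn.2]) [])
      ++ [PySem.List.pyGetD audio_data (-1) []]

-- ===== PRECONDITION & SPEC =====
-- Pre_ excludes exactly the inputs where A raises IndexError: when there are at least two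
-- samples, every sample list must have at least two components (A reads pair[0] and pair[1]).
def Pre_slow_down_filter (audio_data : List (List Int)) : Prop :=
  2 ≤ audio_data.length → ∀ x ∈ audio_data, 2 ≤ x.length
instance (audio_data : List (List Int)) : Decidable (Pre_slow_down_filter audio_data) := by
  unfold Pre_slow_down_filter; infer_instance
def pvWitness_slow_down_filter : List (List Int) := [[1, 2], [3, 5], [-7, 4]]

def Spec_slow_down_filter (audio_data : List (List Int)) (out : List (List Int)) : Prop := out = slow_down_filter_alt audio_data
instance (audio_data : List (List Int)) (out : List (List Int)) : Decidable (Spec_slow_down_filter audio_data out) := by unfold Spec_slow_down_filter; infer_instance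

-- ===== CLAIM (what is proved, stated in full; the proofs are below) =====
def Claim_equal_slow_down_filter : Prop := ∀ (audio_data : List (List Int)), Dom_slow_down_filter audio_data → Pre_slow_down_filter audio_data → Spec_slow_down_filter audio_data (slow_down_filter audio_data)

-- ===== LEMMAS AND PROOFS =====

-- common recursive characterisation: each sample followed by the midpoint to its successor
def pvGo : List (List Int) → List (List Int)
  | [] => []
  | [x] => [x]
  | x :: y :: t => x :: pvMid x y :: pvGo (y :: t)

theorem average_pairs_pair (p q : List Int) : average_pairs [p, q] = pvMid p q := by
  have h2 : PySem.List.pyRange 0 2 1 = [0, 1] := by decide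
  simp [average_pairs, pvMid, h2, PySem.List.pyGetD]

theorem alt_eq_go (xs : List (List Int)) : slow_down_filter_alt xs = pvGo xs := by
  induction xs with
  | nil => simp [slow_down_filter_alt, pvGo]
  | cons x t ih =>
    cases t with
    | nil => simp [slow_down_filter_alt, pvGo, PySem.List.pyGetD, PySem.List.pyGet?_neg_one]
    | cons y t2 =>
      have hy : slow_down_filter_alt (y :: t2) = pvGo (y :: t2) := ih
      simp only [slow_down_filter_alt, pvGo, if_neg (by simp : ¬ (x :: y :: t2 = [])),
        if_neg (by simp : ¬ (y :: t2 = []))] at *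
      simp only [List.drop_succ_cons, List.drop_zero, List.zip_cons_cons,
        PySem.List.foldl_append_eq_flatMap] at *
      have hlast : PySem.List.pyGetD (x :: y :: t2) (-1) ([] : List Int)
          = PySem.List.pyGetD (y :: t2) (-1) ([] : List Int) := by
        simp [PySem.List.pyGetD, PySem.List.pyGet?_neg_one, List.getLast?_cons_cons]
      simp only [List.nil_append] at hy ⊢
      rw [hlast, List.flatMap_cons]
      simp only [List.append_assoc, hy]
      rfl

theorem a_eq_go (xs : List (List Int)) (hpre : Pre_slow_down_filter xs) :
    slow_down_filter xs = pvGo xs := by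
  induction xs with
  | nil =>
    simp [slow_down_filter, pvGo, PySem.List.pyRange_one_eq_nil (by norm_num : (-1 : Int) ≤ 0)]
  | cons x t ih =>
    cases t with
    | nil =>
      have h1 : PySem.List.pyRange 0 1 1 = [0] := by decide
      norm_num [slow_down_filter, pvGo, h1, PySem.Int.mod, PySem.Int.floordiv,
        PySem.List.pyGetD, PySem.List.pyGet?, PySem.List.pyIdx?]
    | cons y t2 =>
      have hpre' : Pre_slow_down_filter (y :: t2) := by
        intro _ z hz
        exact hpre (by simp) z (List.mem_cons_of_mem x hz)
      have ih' := ih hpre'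
      -- lengths
      have hm0 : 1 ≤ ((y :: t2).length : Int) := by push_cast [List.length_cons]; omega
      have hb : ((x :: y :: t2).length : Int) * 2 - 1 = (((y :: t2).length : Int) * 2 - 1) + 2 := by
        push_cast [List.length_cons]; ring
      -- peel the first two indices 0 and 1
      have hr : PySem.List.pyRange 0 ((((y :: t2).length : Int) * 2 - 1) + 2) 1
          = 0 :: 1 :: PySem.List.pyRange 2 ((((y :: t2).length : Int) * 2 - 1) + 2) 1 := by
        rw [PySem.List.pyRange_one_cons (by omega), PySem.List.pyRange_one_cons (by omega)]
        norm_num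
      -- shift the remaining range
      have hshift : PySem.List.pyRange 2 ((((y :: t2).length : Int) * 2 - 1) + 2) 1
          = (PySem.List.pyRange 0 (((y :: t2).length : Int) * 2 - 1) 1).map (fun i => i + 2) := by
        rw [PySem.List.pyRange_one, PySem.List.pyRange_one]
        have he : (((y :: t2).length : Int) * 2 - 1 + 2 - 2) = (((y :: t2).length : Int) * 2 - 1 - 0) := by ring
        rw [he]
        simp only [List.map_map]
        apply List.map_congr_left
        intro k _
        simp
        ring
      -- body equality under the shift
      have hbody : ∀ i ∈ PySem.List.pyRange 0 (((y :: t2).length : Int) * 2 - 1) 1,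
          (if PySem.Int.mod (i + 2) 2 = 0 then
              PySem.List.pyGetD (x :: y :: t2) (PySem.Int.floordiv (i + 2) 2) []
            else
              average_pairs [PySem.List.pyGetD (x :: y :: t2) (PySem.Int.floordiv (i + 2) 2) [],
                             PySem.List.pyGetD (x :: y :: t2) (PySem.Int.floordiv (i + 2) 2 + 1) []])
          = (if PySem.Int.mod i 2 = 0 then
              PySem.List.pyGetD (y :: t2) (PySem.Int.floordiv i 2) []
            else
              average_pairs [PySem.List.pyGetD (y :: t2) (PySem.Int.floordiv i 2) [],
                             PySem.List.pyGetD (y :: t2) (PySem.Int.floordiv i 2 + 1) []]) := by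
        intro i hi
        rw [PySem.List.mem_pyRange_one] at hi
        have hfd2 : PySem.Int.floordiv (i + 2) 2 = PySem.Int.floordiv i 2 + 1 := by
          rw [PySem.Int.floordiv_eq_ediv_of_pos (by omega), PySem.Int.floordiv_eq_ediv_of_pos (by omega)]
          omega
        have hmod : PySem.Int.mod (i + 2) 2 = PySem.Int.mod i 2 := by
          rw [PySem.Int.mod_eq_emod_of_pos (by omega), PySem.Int.mod_eq_emod_of_pos (by omega)]
          omega
        have hfd0 : 0 ≤ PySem.Int.floordiv i 2 := by
          rw [PySem.Int.floordiv_eq_ediv_of_pos (by omega)]; omega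
        have hcons : ∀ j : Int, 0 ≤ j →
            PySem.List.pyGetD (x :: y :: t2) (j + 1) ([] : List Int)
              = PySem.List.pyGetD (y :: t2) j ([] : List Int) := by
          intro j hj
          obtain ⟨k, rfl⟩ := Int.eq_ofNat_of_zero_le hj
          have : ((k : Int) + 1) = ((k + 1 : Nat) : Int) := by push_cast; ring
          rw [this, PySem.List.pyGetD_natCast, PySem.List.pyGetD_natCast]
          rfl
        rw [hfd2, hmod, hcons _ hfd0, hcons _ (by omega)]
      -- assemble
      simp only [slow_down_filter, PySem.List.foldl_append_singleton_eq_map, List.nil_append] at ih' ⊢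
      rw [hb, hr]
      simp only [List.map_cons, hshift, List.map_map]
      have hmap : (PySem.List.pyRange 0 (((y :: t2).length : Int) * 2 - 1) 1).map
          ((fun i =>
            if PySem.Int.mod i 2 = 0 then
              PySem.List.pyGetD (x :: y :: t2) (PySem.Int.floordiv i 2) []
            else
              average_pairs [PySem.List.pyGetD (x :: y :: t2) (PySem.Int.floordiv i 2) [],
                             PySem.List.pyGetD (x :: y :: t2) (PySem.Int.floordiv i 2 + 1) []])
            ∘ (fun i => i + 2))
          = (PySem.List.pyRange 0 (((y :: t2).length : Int) * 2 - 1) 1).map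
            (fun i =>
              if PySem.Int.mod i 2 = 0 then
                PySem.List.pyGetD (y :: t2) (PySem.Int.floordiv i 2) []
              else
                average_pairs [PySem.List.pyGetD (y :: t2) (PySem.Int.floordiv i 2) [],
                               PySem.List.pyGetD (y :: t2) (PySem.Int.floordiv i 2 + 1) []]) :=
        List.map_congr_left (fun i hi => hbody i hi)
      rw [hmap, ih']
      -- first two entries
      have hg0 : (if PySem.Int.mod (0:Int) 2 = 0 then
            PySem.List.pyGetD (x :: y :: t2) (PySem.Int.floordiv 0 2) ([] : List Int)
          else average_pairs [PySem.List.pyGetD (x :: y :: t2) (PySem.Int.floordiv 0 2) [],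
                              PySem.List.pyGetD (x :: y :: t2) (PySem.Int.floordiv 0 2 + 1) []]) = x := by
        simp [PySem.Int.mod, PySem.Int.floordiv, PySem.List.pyGetD]
      have hg1 : (if PySem.Int.mod (1:Int) 2 = 0 then
            PySem.List.pyGetD (x :: y :: t2) (PySem.Int.floordiv 1 2) ([] : List Int)
          else average_pairs [PySem.List.pyGetD (x :: y :: t2) (PySem.Int.floordiv 1 2) [],
                              PySem.List.pyGetD (x :: y :: t2) (PySem.Int.floordiv 1 2 + 1) []])
          = pvMid x y := by
        have h0 : PySem.Int.floordiv (1:Int) 2 = 0 := by decide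
        rw [if_neg (by decide), h0]
        have : PySem.List.pyGetD (x :: y :: t2) (0:Int) ([] : List Int) = x := by
          simp [PySem.List.pyGetD]
        have h1 : PySem.List.pyGetD (x :: y :: t2) ((0:Int) + 1) ([] : List Int) = y := by
          norm_num
          simp [PySem.List.pyGetD]
        rw [this, h1, average_pairs_pair]
      rw [hg0, hg1]
      rfl

-- ===== VERDICT (by name: the statement is the Claim_ definition above) =====
theorem slow_down_filter_spec : Claim_equal_slow_down_filter := by
  intro xs _ hpre
  unfold Spec_slow_down_filter
  rw [a_eq_go xs hpre, alt_eq_go xs]
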